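-- pv_equiv track=rewrite | github.com/cgava/kiss-claw | scripts/enrich_checkpoint.py | classify_blocks
-- ===== SOURCE A (Python) =====
-- def classify_blocks(blocks):
--     """Classify text blocks into artifacts, decisions, issues, and rationale.
--
--     Classification signals:
--         - artifacts: "=== TASK REPORT ===", "Verdict :", "REV-", markdown tables ("|---|")
--         - decisions: "j'ai choisi", "plutot que", "plutôt que", "alternatives"
--         - issues: "caveat", "issue", "limitation", "broken"
--         - rationale: synthesized from decision blocks
--
--     A block can match multiple categories.
--
--     Args:
--         blocks: List of text strings.
--
--     Returns:
--         Dict with keys: artifacts, decisions, issues, rationale (each a string).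
--     """
--     classified = {
--         "artifacts": [],
--         "decisions": [],
--         "issues": [],
--         "rationale": [],
--     }
--
--     for block in blocks:
--         lower = block.lower()
--
--         # Artifact signals
--         if ("=== TASK REPORT ===" in block
--                 or "Verdict :" in block
--                 or "REV-" in block
--                 or "|---|" in block):
--             classified["artifacts"].append(block)
--
--         # Decision signals
--         if any(kw in lower for kw in [
--             "j'ai choisi", "plutot que", "plutôt que", "alternatives"
--         ]):
--             classified["decisions"].append(block)
--
--         # Issue signals
--         if any(kw in lower for kw in [
--             "caveat", "issue", "limitation", "broken"
--         ]):
--             classified["issues"].append(block)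
--
--     # Rationale is synthesized from decision blocks
--     classified["rationale"] = list(classified["decisions"])
--
--     # Join each category into a single string (block scalar friendly)
--     for key in classified:
--         if classified[key]:
--             classified[key] = "\n\n".join(classified[key])
--         else:
--             classified[key] = ""
--
--     return classified
-- ===== SOURCE B (Python) =====
-- ARTIFACT_SIGNALS = ["=== TASK REPORT ===", "Verdict :", "REV-", "|---|"]
-- DECISION_KEYWORDS = ["j'ai choisi", "plutot que", "plut\u00f4t que", "alternatives"]
-- ISSUE_KEYWORDS = ["caveat", "issue", "limitation", "broken"]
--
--
-- def _emit(acc):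
--     return "" if acc is None else acc
--
--
-- def classify_blocks(blocks):
--     """One right-to-left pass building each joined string directly.
--
--     Instead of collecting matching blocks into lists and joining them at the
--     end, walk the blocks back-to-front and prepend each matching block (with
--     the "\n\n" separator) onto a string accumulator; None marks 'no match yet'.
--     """
--     arts = decs = iss = None
--     for block in reversed(blocks):
--         low = block.lower()
--         if any(sig in block for sig in ARTIFACT_SIGNALS):
--             arts = block if arts is None else block + "\n\n" + arts
--         if any(kw in low for kw in DECISION_KEYWORDS):
--             decs = block if decs is None else block + "\n\n" + decs
--         if any(kw in low for kw in ISSUE_KEYWORDS):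
--             iss = block if iss is None else block + "\n\n" + iss
--     return {
--         "artifacts": _emit(arts),
--         "decisions": _emit(decs),
--         "issues": _emit(iss),
--         "rationale": _emit(decs),
--     }
-- ===== Notes on version B (the rewrite author's own statement) =====
-- stated objective: alternative
-- what changed: Replaces A's forward loop that appends matching blocks into three lists plus a final dict-key fix-up loop joining each list, with a single right-to-left pass that builds each joined output string directly via None-sentinel string accumulators (prepending block + '\n\n'), so no intermediate lists and no join step exist.
import Mathlib
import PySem

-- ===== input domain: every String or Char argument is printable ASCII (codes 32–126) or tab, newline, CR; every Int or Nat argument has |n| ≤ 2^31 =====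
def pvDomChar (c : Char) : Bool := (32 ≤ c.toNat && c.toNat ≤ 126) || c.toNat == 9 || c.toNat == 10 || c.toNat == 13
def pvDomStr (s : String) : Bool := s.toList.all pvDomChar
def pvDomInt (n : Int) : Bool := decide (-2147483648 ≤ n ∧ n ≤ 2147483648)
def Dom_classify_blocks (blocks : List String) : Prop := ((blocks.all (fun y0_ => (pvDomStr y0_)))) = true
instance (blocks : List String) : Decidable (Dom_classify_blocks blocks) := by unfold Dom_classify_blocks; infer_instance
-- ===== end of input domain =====

-- B replaces A's forward list-append loop plus join fix-up with one right-to-left pass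
-- building each joined string directly through None-sentinel accumulators; objective: alternative.

-- ===== PORT A =====
-- one loop step: test the three signal groups on the current block, append where they match
def pvA_step (st : List String × List String × List String) (block : String) :
    List String × List String × List String :=
  let lower := PySem.Str.lower block
  let arts := if PySem.Str.isIn "=== TASK REPORT ===" block
      || PySem.Str.isIn "Verdict :" block
      || PySem.Str.isIn "REV-" block
      || PySem.Str.isIn "|---|" block then st.1 ++ [block] else st.1
  let decs := if (["j'ai choisi", "plutot que", "plutôt que", "alternatives"]).any
      (fun kw => PySem.Str.isIn kw lower) then st.2.1 ++ [block] else st.2.1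
  let iss := if (["caveat", "issue", "limitation", "broken"]).any
      (fun kw => PySem.Str.isIn kw lower) then st.2.2 ++ [block] else st.2.2
  (arts, decs, iss)

-- "if classified[key]: join else ''" — Python truthiness of a list is non-emptiness
def pvA_finish (l : List String) : String :=
  if l.isEmpty then "" else PySem.Str.join "\n\n" l

def classify_blocks (blocks : List String) : List (String × String) :=
  let st := blocks.foldl pvA_step ([], [], [])
  let rationale := st.2.1
  [("artifacts", pvA_finish st.1),
   ("decisions", pvA_finish st.2.1),
   ("issues", pvA_finish st.2.2),
   ("rationale", pvA_finish rationale)]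

-- ===== PORT B =====
-- 'block if acc is None else block + "\n\n" + acc'
def pvB_prep (block : String) (acc : Option String) : Option String :=
  match acc with
  | none => some block
  | some r => some (block ++ "\n\n" ++ r)

-- one step of the reversed loop: three None-sentinel string accumulators
def pvB_step (st : Option String × Option String × Option String) (block : String) :
    Option String × Option String × Option String :=
  let low := PySem.Str.lower block
  let arts := if (["=== TASK REPORT ===", "Verdict :", "REV-", "|---|"]).any
      (fun sig => PySem.Str.isIn sig block) then pvB_prep block st.1 else st.1
  let decs := if (["j'ai choisi", "plutot que", "plutôt que", "alternatives"]).any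
      (fun kw => PySem.Str.isIn kw low) then pvB_prep block st.2.1 else st.2.1
  let iss := if (["caveat", "issue", "limitation", "broken"]).any
      (fun kw => PySem.Str.isIn kw low) then pvB_prep block st.2.2 else st.2.2
  (arts, decs, iss)

-- '"" if acc is None else acc'
def pvB_emit (acc : Option String) : String :=
  match acc with
  | none => ""
  | some s => s

def classify_blocks_alt (blocks : List String) : List (String × String) :=
  let st := (blocks.reverse).foldl pvB_step (none, none, none)
  [("artifacts", pvB_emit st.1),
   ("decisions", pvB_emit st.2.1),
   ("issues", pvB_emit st.2.2),
   ("rationale", pvB_emit st.2.1)]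

-- ===== PRECONDITION & SPEC =====
def Spec_classify_blocks (blocks : List String) (out : List (String × String)) : Prop := out = classify_blocks_alt blocks
instance (blocks : List String) (out : List (String × String)) : Decidable (Spec_classify_blocks blocks out) := by unfold Spec_classify_blocks; infer_instance

-- ===== CLAIM =====
def Claim_equal_classify_blocks : Prop := ∀ (blocks : List String), Dom_classify_blocks blocks → Spec_classify_blocks blocks (classify_blocks blocks)

-- ===== LEMMAS AND PROOFS =====

-- the three membership predicates (proof-side names for the tests both loops make)
def pvP_art (b : String) : Bool :=
  (["=== TASK REPORT ===", "Verdict :", "REV-", "|---|"]).any (fun sig => PySem.Str.isIn sig b)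
def pvP_dec (b : String) : Bool :=
  (["j'ai choisi", "plutot que", "plutôt que", "alternatives"]).any
    (fun kw => PySem.Str.isIn kw (PySem.Str.lower b))
def pvP_iss (b : String) : Bool :=
  (["caveat", "issue", "limitation", "broken"]).any
    (fun kw => PySem.Str.isIn kw (PySem.Str.lower b))

-- A's loop with three list accumulators is the three filters appended
theorem pvA_foldl_eq (blocks : List String) :
    ∀ (a b c : List String),
      blocks.foldl pvA_step (a, b, c)
        = (a ++ blocks.filter pvP_art, b ++ blocks.filter pvP_dec, c ++ blocks.filter pvP_iss) := by
  induction blocks with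
  | nil => intro a b c; simp
  | cons x xs ih =>
    intro a b c
    simp only [List.foldl_cons, List.filter_cons]
    rw [show pvA_step (a, b, c) x
        = ((if pvP_art x then a ++ [x] else a),
           (if pvP_dec x then b ++ [x] else b),
           (if pvP_iss x then c ++ [x] else c)) from by
      simp [pvA_step, pvP_art, pvP_dec, pvP_iss, or_assoc]]
    rw [ih]
    by_cases h1 : pvP_art x <;> by_cases h2 : pvP_dec x <;> by_cases h3 : pvP_iss x <;>
      simp [h1, h2, h3]

-- B's reversed loop with a triple state is three independent foldr's
theorem pvB_foldl_split (blocks : List String) (a b c : Option String) :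
    (blocks.reverse).foldl pvB_step (a, b, c)
      = (blocks.foldr (fun x acc => if pvP_art x then pvB_prep x acc else acc) a,
         blocks.foldr (fun x acc => if pvP_dec x then pvB_prep x acc else acc) b,
         blocks.foldr (fun x acc => if pvP_iss x then pvB_prep x acc else acc) c) := by
  rw [List.foldl_reverse]
  induction blocks with
  | nil => rfl
  | cons x xs ih =>
    simp only [List.foldr_cons, ih]
    simp [pvB_step, pvP_art, pvP_dec, pvP_iss]

-- joined string of a nonempty filter, as an option
def pvOptJoin (l : List String) : Option String :=
  if l.isEmpty then none else some (PySem.Str.join "\n\n" l)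

theorem pv_join_cons (x : String) (y : String) (t : List String) :
    PySem.Str.join "\n\n" (x :: y :: t) = x ++ "\n\n" ++ PySem.Str.join "\n\n" (y :: t) := by
  apply String.toList_injective
  simp [PySem.Chars.join_cons_cons]

theorem pv_join_singleton (x : String) : PySem.Str.join "\n\n" [x] = x := by
  apply String.toList_injective
  simp [PySem.Chars.join_singleton]

-- the one-predicate foldr builds exactly the joined filter
theorem pvB_foldr_eq (p : String → Bool) (blocks : List String) :
    blocks.foldr (fun x acc => if p x then pvB_prep x acc else acc) none
      = pvOptJoin (blocks.filter p) := by
  induction blocks with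
  | nil => rfl
  | cons x xs ih =>
    simp only [List.foldr_cons, ih, List.filter_cons]
    by_cases hp : p x
    · simp only [hp, if_pos]
      cases hfx : xs.filter p with
      | nil => simp [pvOptJoin, pvB_prep, pv_join_singleton]
      | cons y t => simp [pvOptJoin, pvB_prep, pv_join_cons]
    · simp [hp]

theorem pv_emit_optJoin (l : List String) : pvB_emit (pvOptJoin l) = pvA_finish l := by
  cases l <;> simp [pvOptJoin, pvB_emit, pvA_finish]

-- ===== VERDICT =====
theorem classify_blocks_spec : Claim_equal_classify_blocks := by
  intro blocks _
  unfold Spec_classify_blocks classify_blocks classify_blocks_alt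
  simp only [pvA_foldl_eq blocks [] [] [], List.nil_append,
    pvB_foldl_split, pvB_foldr_eq, pv_emit_optJoin]
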